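-- pv_equiv track=rewrite | github.com/with-developer/Algorithm | 백준/Silver/18111. 마인크래프트/마인크래프트.py | minecraft
-- ===== SOURCE A (Python) =====
-- def minecraft(ground, N, M, B):
--     heightCounts = {}
--     for row in ground:
--         for height in row:
--             heightCounts[height] = heightCounts.get(height, 0) + 1
--
--     minHeight = min(heightCounts.keys())
--     maxHeight = max(heightCounts.keys())
--
--     minTime = float('inf')
--     finalHeight = 0
--
--     for targetHeight in range(minHeight, maxHeight + 1):
--         inventory = B
--         time = 0
--
--         for height, count in heightCounts.items():
--             if height > targetHeight:
--                 inventory += (height - targetHeight) * count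
--                 time += 2 * (height - targetHeight) * count
--             elif height < targetHeight:
--                 inventory -= (targetHeight - height) * count
--                 time += (targetHeight - height) * count
--
--         if inventory >= 0:
--             if time <= minTime:
--                 minTime = time
--                 finalHeight = targetHeight
--
--     return minTime, finalHeight
-- ===== SOURCE B (Python) =====
-- def minecraft(ground, N, M, B):
--     heights = [h for row in ground for h in row]
--     counts = {}
--     for h in heights:
--         counts[h] = counts.get(h, 0) + 1
--     total = len(heights)
--     s = sum(heights)
--     lo = min(heights)
--     hi = max(heights)
--     # highest feasible target: inventory(t) = B + s - t*total is decreasing in t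
--     tmax = (B + s) // total
--     # time at target lo, then updated incrementally per target
--     time = 2 * (s - lo * total)
--     cntLE = 0
--     best = None
--     bestT = 0
--     t = lo
--     while t <= hi:
--         cntLE += counts.get(t, 0)
--         if t <= tmax and (best is None or time <= best):
--             best = time
--             bestT = t
--         time += 3 * cntLE - 2 * total
--         t += 1
--     return best, bestT
-- ===== Notes on version B (the rewrite author's own statement) =====
-- stated objective: faster
-- what changed: A recomputes time and inventory by rescanning the whole height histogram for every candidate target height; B sweeps the targets once, updating the time in O(1) per target from a running count of cells at-or-below the target and deciding feasibility by a single floor-division bound on the target.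
-- outside the precondition, e.g. on minecraft([[0]], 1, 1, -1): A returns (inf, 0), B returns (None, 0)
import Mathlib
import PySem

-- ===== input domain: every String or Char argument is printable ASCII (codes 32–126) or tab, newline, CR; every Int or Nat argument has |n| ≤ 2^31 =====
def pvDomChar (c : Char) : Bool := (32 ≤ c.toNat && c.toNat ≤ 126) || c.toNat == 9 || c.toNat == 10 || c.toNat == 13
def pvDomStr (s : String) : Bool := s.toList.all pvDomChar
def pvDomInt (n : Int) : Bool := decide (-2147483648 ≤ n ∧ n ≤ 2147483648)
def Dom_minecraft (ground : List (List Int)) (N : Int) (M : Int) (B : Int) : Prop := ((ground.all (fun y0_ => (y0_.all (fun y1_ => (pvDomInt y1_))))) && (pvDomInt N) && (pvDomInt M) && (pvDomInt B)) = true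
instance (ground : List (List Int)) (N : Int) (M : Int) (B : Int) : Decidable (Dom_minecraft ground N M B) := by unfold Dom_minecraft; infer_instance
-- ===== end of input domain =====

-- B replaces A's per-target rescan of the height histogram by one incremental sweep
-- (running count of cells ≤ target updates the time in O(1) per target; feasibility by
-- a single floor-division bound): objective faster. Equivalence is about return values.

-- ===== PORT A =====
def minecraft (ground : List (List Int)) (N : Int) (M : Int) (B : Int) : Int × Int :=
  let heightCounts : PySem.Dict Int Int :=
    ground.foldl (fun d row => row.foldl (fun d h => d.insert h (d.getD h 0 + 1)) d) PySem.Dict.empty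
  match PySem.List.min? heightCounts.keys (fun x => x), PySem.List.max? heightCounts.keys (fun x => x) with
  | some minHeight, some maxHeight =>
    -- minTime = float('inf') is modelled as `none`; under Pre_ it is `some` at the end
    let r := (PySem.List.pyRange minHeight (maxHeight + 1) 1).foldl
      (fun (st : Option Int × Int) targetHeight =>
        let p := heightCounts.items.foldl
          (fun (q : Int × Int) e =>
            if e.1 > targetHeight then (q.1 + (e.1 - targetHeight) * e.2, q.2 + 2 * (e.1 - targetHeight) * e.2)
            else if e.1 < targetHeight then (q.1 - (targetHeight - e.1) * e.2, q.2 + (targetHeight - e.1) * e.2)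
            else q) (B, 0)
        if p.1 ≥ 0 then
          if (match st.1 with | none => true | some mv => decide (p.2 ≤ mv)) then (some p.2, targetHeight)
          else st
        else st) ((none : Option Int), (0 : Int))
    (r.1.getD 0, r.2)
  | _, _ => (0, 0)   -- Python raises ValueError (min of empty dict) here; outside Pre_

-- ===== PORT B =====
def bLoop (counts : PySem.Dict Int Int) (total tmax hi : Int)
    (t time cntLE : Int) (best : Option Int) (bestT : Int) : Option Int × Int :=
  if h : t ≤ hi then
    let cntLE' := cntLE + counts.getD t 0
    let st :=
      if (decide (t ≤ tmax) && (match best with | none => true | some v => decide (time ≤ v))) then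
        ((some time : Option Int), t)
      else (best, bestT)
    bLoop counts total tmax hi (t + 1) (time + 3 * cntLE' - 2 * total) cntLE' st.1 st.2
  else (best, bestT)
termination_by (hi + 1 - t).toNat
decreasing_by omega

def minecraft_alt (ground : List (List Int)) (N : Int) (M : Int) (B : Int) : Int × Int :=
  let heights := ground.flatMap (fun row => row)
  let counts := heights.foldl (fun d h => d.insert h (d.getD h 0 + 1)) PySem.Dict.empty
  match PySem.List.min? heights (fun x => x) with
  | none => (0, 0)   -- Source B raises ValueError (min of empty list) here; outside Pre_
  | some lo =>
    match PySem.List.max? heights (fun x => x) with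
    | none => (0, 0)
    | some hi =>
      let total : Int := heights.length
      let s := heights.sum
      let tmax := PySem.Int.floordiv (B + s) total
      let r := bLoop counts total tmax hi lo (2 * (s - lo * total)) 0 none 0
      (r.1.getD 0, r.2)

-- ===== PRECONDITION & SPEC =====
-- Pre_ excludes the empty grid (A raises ValueError) and grids where no target height is
-- reachable with the inventory (inventory stays negative for every target), where A returns
-- float('inf') — a float, not a value of the declared Int type; B returns None there.
def Pre_minecraft (ground : List (List Int)) (N : Int) (M : Int) (B : Int) : Prop :=
  ∃ m ∈ ground.flatMap (fun row => row),
    (∀ y ∈ ground.flatMap (fun row => row), m ≤ y) ∧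
    0 ≤ B + (ground.flatMap (fun row => row)).sum - m * (ground.flatMap (fun row => row)).length
instance (ground : List (List Int)) (N : Int) (M : Int) (B : Int) : Decidable (Pre_minecraft ground N M B) := by
  unfold Pre_minecraft; infer_instance

def pvWitness_minecraft : List (List Int) × Int × Int × Int := ([[0, 2], [1, 0]], 2, 2, 1)

def Spec_minecraft (ground : List (List Int)) (N : Int) (M : Int) (B : Int) (out : Int × Int) : Prop := out = minecraft_alt ground N M B
instance (ground : List (List Int)) (N : Int) (M : Int) (B : Int) (out : Int × Int) : Decidable (Spec_minecraft ground N M B out) := by unfold Spec_minecraft; infer_instance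

-- ===== CLAIM (what is proved, stated in full; the proofs are below) =====
def Claim_equal_minecraft : Prop := ∀ (ground : List (List Int)) (N : Int) (M : Int) (B : Int), Dom_minecraft ground N M B → Pre_minecraft ground N M B → Spec_minecraft ground N M B (minecraft ground N M B)

-- ===== LEMMAS AND PROOFS =====

-- cost that target t charges to one cell of height h, and total cost over xs
def fcost (h t : Int) : Int := if h > t then 2 * (h - t) else if h < t then t - h else 0
def Ts (xs : List Int) (t : Int) : Int := (xs.map (fun h => fcost h t)).sum
-- number of cells of height < t
def Cl (xs : List Int) (t : Int) : Int := (xs.countP (fun x => decide (x < t)) : Int)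

-- the common selection step over one target t
def selStep (Bv : Int) (xs : List Int) (st : Option Int × Int) (t : Int) : Option Int × Int :=
  if 0 ≤ Bv + xs.sum - t * xs.length then
    if (match st.1 with | none => true | some mv => decide (Ts xs t ≤ mv)) then (some (Ts xs t), t)
    else st
  else st

theorem Ts_cons (a : Int) (l : List Int) (t : Int) : Ts (a :: l) t = fcost a t + Ts l t := by
  simp [Ts]

theorem Cl_cons (a : Int) (l : List Int) (t : Int) :
    Cl (a :: l) t = (if a < t then 1 else 0) + Cl l t := by
  simp only [Cl, List.countP_cons]; split_ifs <;> push_cast <;> simp_all <;> ring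

theorem countDict (ground : List (List Int)) :
    ground.foldl (fun d row => row.foldl (fun d h => d.insert h (d.getD h 0 + 1)) d) PySem.Dict.empty
      = PySem.Dict.counter ground.flatten := by
  rw [← List.foldl_flatten, PySem.Dict.foldl_insert_getD_add_one_eq_counter]

theorem sum_map_single (D : List Int) (hD : D.Nodup) (x : Int) (hx : x ∈ D) (c : Int → Int) :
    (D.map (fun k => if k = x then c k else 0)).sum = c x := by
  induction D with
  | nil => cases hx
  | cons a D ih =>
    rcases List.mem_cons.mp hx with h | h
    · subst h
      have hnx : x ∉ D := (List.nodup_cons.mp hD).1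
      have hz : (D.map (fun k => if k = x then c k else 0)).sum = 0 := by
        apply List.sum_eq_zero; intro y hy
        obtain ⟨k, hk, rfl⟩ := List.mem_map.mp hy
        have : k ≠ x := fun he => hnx (he ▸ hk)
        simp [this]
      simp [hz]
    · have hax : a ≠ x := fun he => ((List.nodup_cons.mp hD).1 (he ▸ h)).elim
      simp [hax, ih (List.nodup_cons.mp hD).2 h]

theorem sum_count_mul (xs : List Int) (D : List Int) (hD : D.Nodup)
    (hsub : ∀ k ∈ xs, k ∈ D) (g : Int → Int) :
    (D.map (fun k => (xs.count k : Int) * g k)).sum = (xs.map g).sum := by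
  induction xs with
  | nil => simp
  | cons x xs ih =>
    have h1 : (D.map (fun k => ((x :: xs).count k : Int) * g k)).sum
        = (D.map (fun k => (xs.count k : Int) * g k + (if k = x then g k else 0))).sum := by
      apply congrArg
      apply List.map_congr_left
      intro k hk
      rw [List.count_cons]
      split_ifs with h h' h'
      · simp_all; push_cast; ring
      · simp_all
      · simp_all
      · simp_all
    rw [h1, PySem.List.sum_map_add_int, ih (fun k hk => hsub k (List.mem_cons_of_mem _ hk)),
        sum_map_single D hD x (hsub x List.mem_cons_self) g]
    simp [add_comm]

theorem sum_sub (xs : List Int) (t : Int) :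
    (xs.map (fun x => x - t)).sum = xs.sum - t * xs.length := by
  induction xs with
  | nil => simp
  | cons a l ih => simp [ih]; push_cast; ring

theorem innerA (xs : List Int) (B t : Int) :
    (PySem.Dict.counter xs).items.foldl
      (fun (q : Int × Int) e =>
        if e.1 > t then (q.1 + (e.1 - t) * e.2, q.2 + 2 * (e.1 - t) * e.2)
        else if e.1 < t then (q.1 - (t - e.1) * e.2, q.2 + (t - e.1) * e.2)
        else q) (B, 0)
    = (B + xs.sum - t * xs.length, Ts xs t) := by
  have hfun : (fun (q : Int × Int) (e : Int × Int) =>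
        if e.1 > t then (q.1 + (e.1 - t) * e.2, q.2 + 2 * (e.1 - t) * e.2)
        else if e.1 < t then (q.1 - (t - e.1) * e.2, q.2 + (t - e.1) * e.2)
        else q)
      = fun q e => (q.1 + e.2 * (e.1 - t), q.2 + e.2 * fcost e.1 t) := by
    funext q e
    unfold fcost
    split_ifs with h1 h2
    · rw [Prod.mk.injEq]; constructor <;> ring
    · rw [Prod.mk.injEq]; constructor <;> ring
    · have : e.1 = t := by omega
      simp [this]
  rw [hfun,
    PySem.List.foldl_prod_mk (f := fun a (e : Int × Int) => a + e.2 * (e.1 - t))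
      (g := fun a (e : Int × Int) => a + e.2 * fcost e.1 t),
    PySem.List.foldl_add _ (fun (e : Int × Int) => e.2 * (e.1 - t)),
    PySem.List.foldl_add _ (fun (e : Int × Int) => e.2 * fcost e.1 t)]
  rw [PySem.Dict.items_counter, List.map_map, List.map_map]
  have hnd := PySem.Set.nodup_ofList xs
  have hsub : ∀ k ∈ xs, k ∈ PySem.Set.ofList xs := fun k hk => (PySem.Set.mem_ofList xs k).mpr hk
  have e1 : ((PySem.Set.ofList xs).map ((fun (e : Int × Int) => e.2 * (e.1 - t)) ∘ fun k => (k, (xs.count k : Int)))).sum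
      = (xs.map (fun x => x - t)).sum :=
    sum_count_mul xs _ hnd hsub (fun k => k - t)
  have e2 : ((PySem.Set.ofList xs).map ((fun (e : Int × Int) => e.2 * fcost e.1 t) ∘ fun k => (k, (xs.count k : Int)))).sum
      = (xs.map (fun h => fcost h t)).sum :=
    sum_count_mul xs _ hnd hsub (fun k => fcost k t)
  rw [e1, e2, sum_sub]
  simp [Ts]
  ring

theorem Ts_lo (xs : List Int) (lo : Int) (h : ∀ x ∈ xs, lo ≤ x) :
    Ts xs lo = 2 * (xs.sum - lo * xs.length) := by
  induction xs with
  | nil => simp [Ts]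
  | cons a l ih =>
    have ha : fcost a lo = 2 * (a - lo) := by
      unfold fcost; have := h a (List.mem_cons_self); split_ifs <;> omega
    rw [Ts_cons, ha, ih (fun x hx => h x (List.mem_cons_of_mem _ hx))]
    simp; push_cast; ring

theorem Cl_lo (xs : List Int) (lo : Int) (h : ∀ x ∈ xs, lo ≤ x) : Cl xs lo = 0 := by
  simp only [Cl]
  rw [List.countP_eq_zero.mpr]
  · simp
  · intro x hx; simpa using not_lt.mpr (h x hx)

theorem Cl_step (xs : List Int) (t : Int) : Cl xs t + (xs.count t : Int) = Cl xs (t + 1) := by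
  induction xs with
  | nil => simp [Cl]
  | cons a l ih =>
    rw [Cl_cons, Cl_cons, List.count_cons]
    push_cast
    rcases lt_trichotomy a t with h | h | h <;> simp_all <;> omega

theorem Ts_step (xs : List Int) (t : Int) :
    Ts xs (t + 1) = Ts xs t + 3 * Cl xs (t + 1) - 2 * xs.length := by
  induction xs with
  | nil => simp [Ts, Cl]
  | cons a l ih =>
    have ha : fcost a (t + 1) = fcost a t + (if a < t + 1 then 3 else 0) - 2 := by
      unfold fcost; split_ifs <;> omega
    rw [Ts_cons, Ts_cons, ha, Cl_cons, ih]
    simp; split_ifs <;> push_cast <;> ring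

theorem bloop_eq (xs : List Int) (Bv hi : Int) (hne : xs ≠ []) :
    ∀ (k : Nat) (t : Int), (hi + 1 - t).toNat = k →
    ∀ (best : Option Int) (bestT : Int),
      bLoop (PySem.Dict.counter xs) xs.length (PySem.Int.floordiv (Bv + xs.sum) xs.length) hi
        t (Ts xs t) (Cl xs t) best bestT
      = (PySem.List.pyRange t (hi + 1) 1).foldl (selStep Bv xs) (best, bestT) := by
  have hlen : (0 : Int) < xs.length := by
    cases xs with
    | nil => exact absurd rfl hne
    | cons a l => simp
  intro k
  induction k with
  | zero =>
    intro t ht best bestT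
    rw [bLoop.eq_def, dif_neg (by omega), PySem.List.pyRange_one_eq_nil (by omega)]
    rfl
  | succ k ih =>
    intro t ht best bestT
    have htle : t ≤ hi := by omega
    rw [bLoop.eq_def, dif_pos htle]
    simp only []
    have hcnt : Cl xs t + (PySem.Dict.counter xs).getD t 0 = Cl xs (t + 1) := by
      rw [PySem.Dict.getD_counter]; exact Cl_step xs t
    rw [hcnt]
    have htime : Ts xs t + 3 * Cl xs (t + 1) - 2 * (xs.length : Int) = Ts xs (t + 1) := by
      rw [Ts_step]
    rw [htime]
    have hfe : decide (t ≤ PySem.Int.floordiv (Bv + xs.sum) xs.length)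
        = decide (0 ≤ Bv + xs.sum - t * xs.length) := by
      rw [decide_eq_decide, PySem.Int.le_floordiv_iff_mul_le hlen]
      omega
    rw [PySem.List.pyRange_one_cons (by omega), List.foldl_cons]
    have hsel : (if (decide (t ≤ PySem.Int.floordiv (Bv + xs.sum) xs.length) &&
          (match best with | none => true | some v => decide (Ts xs t ≤ v))) then
          ((some (Ts xs t) : Option Int), t) else (best, bestT))
        = selStep Bv xs (best, bestT) t := by
      rw [hfe]
      unfold selStep
      by_cases hf : 0 ≤ Bv + xs.sum - t * xs.length
      · simp only [hf, decide_true, Bool.true_and]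
        cases best <;> simp
      · simp only [hf, decide_false, Bool.false_and]
        simp
    rw [hsel]
    exact ih (t + 1) (by omega) _ _

-- ===== VERDICT (by name: the statement is the Claim_ definition above) =====
theorem minecraft_spec : Claim_equal_minecraft := by
  intro ground N M B hdom hpre
  unfold Spec_minecraft
  obtain ⟨m, hm, hminP, hfeas⟩ := hpre
  set xs := ground.flatMap (fun row => row) with hxs
  have hflat : ground.flatten = xs := List.flatMap_id'.symm
  have hne : xs ≠ [] := fun h => by simp [h] at hm
  cases hminx : PySem.List.min? xs (fun x => x) with
  | none => exact absurd ((PySem.List.min?_eq_none_iff xs _).mp hminx) hne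
  | some lo =>
  cases hmaxx : PySem.List.max? xs (fun x => x) with
  | none => exact absurd ((PySem.List.max?_eq_none_iff xs _).mp hmaxx) hne
  | some hi =>
  have hlo_mem : lo ∈ xs := PySem.List.min?_mem hminx
  have hlo_min : ∀ y ∈ xs, lo ≤ y := PySem.List.min?_isMin hminx
  have hhi_mem : hi ∈ xs := PySem.List.max?_mem hmaxx
  have hhi_max : ∀ y ∈ xs, y ≤ hi := PySem.List.max?_isMax hmaxx
  have hkmin : PySem.List.min? (PySem.Set.ofList xs) (fun x => x) = some lo := by
    cases hk : PySem.List.min? (PySem.Set.ofList xs) (fun x => x) with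
    | none =>
      have h0 := (PySem.List.min?_eq_none_iff _ _).mp hk
      have : lo ∈ PySem.Set.ofList xs := (PySem.Set.mem_ofList xs lo).mpr hlo_mem
      rw [h0] at this; cases this
    | some lo' =>
      have h1 : lo' ∈ xs := (PySem.Set.mem_ofList xs lo').mp (PySem.List.min?_mem hk)
      have h2 : lo' ≤ lo := PySem.List.min?_isMin hk lo ((PySem.Set.mem_ofList xs lo).mpr hlo_mem)
      have h3 : lo ≤ lo' := hlo_min lo' h1
      have : lo' = lo := le_antisymm h2 h3
      rw [this]
  have hkmax : PySem.List.max? (PySem.Set.ofList xs) (fun x => x) = some hi := by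
    cases hk : PySem.List.max? (PySem.Set.ofList xs) (fun x => x) with
    | none =>
      have h0 := (PySem.List.max?_eq_none_iff _ _).mp hk
      have : hi ∈ PySem.Set.ofList xs := (PySem.Set.mem_ofList xs hi).mpr hhi_mem
      rw [h0] at this; cases this
    | some hi' =>
      have h1 : hi' ∈ xs := (PySem.Set.mem_ofList xs hi').mp (PySem.List.max?_mem hk)
      have h2 : hi ≤ hi' := PySem.List.max?_isMax hk hi ((PySem.Set.mem_ofList xs hi).mpr hhi_mem)
      have h3 : hi' ≤ hi := hhi_max hi' h1
      have : hi' = hi := le_antisymm h3 h2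
      rw [this]
  have hstep : (fun (st : Option Int × Int) targetHeight =>
        let p := (PySem.Dict.counter xs).items.foldl
          (fun (q : Int × Int) e =>
            if e.1 > targetHeight then (q.1 + (e.1 - targetHeight) * e.2, q.2 + 2 * (e.1 - targetHeight) * e.2)
            else if e.1 < targetHeight then (q.1 - (targetHeight - e.1) * e.2, q.2 + (targetHeight - e.1) * e.2)
            else q) (B, 0)
        if p.1 ≥ 0 then
          if (match st.1 with | none => true | some mv => decide (p.2 ≤ mv)) then (some p.2, targetHeight)
          else st
        else st)
      = selStep B xs := by
    funext st t
    simp only [innerA]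
    rfl
  have hA : minecraft ground N M B
      = (((PySem.List.pyRange lo (hi + 1) 1).foldl (selStep B xs) (none, 0)).1.getD 0,
         ((PySem.List.pyRange lo (hi + 1) 1).foldl (selStep B xs) (none, 0)).2) := by
    unfold minecraft
    simp only [countDict, hflat, PySem.Dict.keys_counter, hkmin, hkmax, hstep]
  have hB : minecraft_alt ground N M B
      = (((PySem.List.pyRange lo (hi + 1) 1).foldl (selStep B xs) (none, 0)).1.getD 0,
         ((PySem.List.pyRange lo (hi + 1) 1).foldl (selStep B xs) (none, 0)).2) := by
    unfold minecraft_alt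
    simp only [← hxs, PySem.Dict.foldl_insert_getD_add_one_eq_counter, hminx, hmaxx]
    rw [show (2 * (xs.sum - lo * (xs.length : Int))) = Ts xs lo from (Ts_lo xs lo hlo_min).symm,
        show (0 : Int) = Cl xs lo from (Cl_lo xs lo hlo_min).symm,
        bloop_eq xs B hi hne ((hi + 1 - lo).toNat) lo rfl none (Cl xs lo)]
  rw [hA, hB]
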